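-- pv_equiv track=rewrite | github.com/amkaa1/telegram-sanhvvmgl2026-bot | utils/text.py | chunk_telegram_html
-- ===== SOURCE A (Python) =====
-- def chunk_telegram_html(text: str, limit: int = 4000) -> list[str]:
--     """Split long HTML so each part stays under Telegram's ~4096 char limit."""
--     text = text.rstrip()
--     if not text:
--         return []
--     if len(text) <= limit:
--         return [text]
--     chunks: list[str] = []
--     current: list[str] = []
--     current_len = 0
--     for line in text.split("\n"):
--         add_len = len(line) + (1 if current else 0)
--         if current_len + add_len > limit and current:
--             chunks.append("\n".join(current))
--             current = [line]
--             current_len = len(line)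
--         else:
--             current_len += add_len
--             current.append(line)
--     if current:
--         chunks.append("\n".join(current))
--     out: list[str] = []
--     for c in chunks:
--         if len(c) <= limit:
--             out.append(c)
--             continue
--         for i in range(0, len(c), limit):
--             out.append(c[i : i + limit])
--     return out
-- ===== SOURCE B (Python) =====
-- def chunk_telegram_html(text: str, limit: int = 4000) -> list[str]:
--     """Split long HTML so each part stays under Telegram's ~4096 char limit."""
--     text = text.rstrip()
--     if not text:
--         return []
--     if len(text) <= limit:
--         return [text]
--     # Key fact: in the greedy grouping, a chunk can only exceed the limit when it
--     # is a single over-long line.  So slice over-long lines inline and keep the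
--     # current chunk as one already-joined string (None = no pending chunk),
--     # instead of building a list of line-groups and re-scanning it.
--     out: list[str] = []
--     buf: str | None = None
--     for line in text.split("\n"):
--         if len(line) > limit:
--             if buf is not None:
--                 out.append(buf)
--                 buf = None
--             for i in range(0, len(line), limit):
--                 out.append(line[i : i + limit])
--         elif buf is None:
--             buf = line
--         elif len(buf) + 1 + len(line) <= limit:
--             buf = buf + "\n" + line
--         else:
--             out.append(buf)
--             buf = line
--     if buf is not None:
--         out.append(buf)
--     return out
-- ===== Notes on version B (the rewrite author's own statement) =====
-- stated objective: alternative
-- what changed: B replaces A's two staged passes (group lines into a chunks list, then re-scan it to hard-split over-long chunks) with a single loop over the lines whose state is an Optional already-joined string buffer: it relies on the invariant that only a single over-long line can produce an over-long chunk, so over-long lines are sliced and emitted inline and every other chunk is appended directly, with no line-group lists, no length counter and no intermediate chunks list.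
-- outside the precondition, e.g. on chunk_telegram_html('abc', 0): A raises ValueError, B raises ValueError
import Mathlib
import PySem

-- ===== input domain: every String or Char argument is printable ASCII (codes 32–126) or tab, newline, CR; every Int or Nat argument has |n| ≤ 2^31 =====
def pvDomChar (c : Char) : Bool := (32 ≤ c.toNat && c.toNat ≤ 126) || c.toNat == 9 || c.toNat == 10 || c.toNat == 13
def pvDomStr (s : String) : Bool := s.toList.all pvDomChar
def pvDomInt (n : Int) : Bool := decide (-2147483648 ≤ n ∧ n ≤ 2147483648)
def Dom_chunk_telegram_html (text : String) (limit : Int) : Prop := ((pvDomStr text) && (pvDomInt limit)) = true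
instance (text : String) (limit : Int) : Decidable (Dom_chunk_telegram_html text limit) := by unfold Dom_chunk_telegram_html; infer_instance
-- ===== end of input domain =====

-- B uses a different algorithm: one pass with an Optional already-joined buffer, slicing over-long lines inline (relying on the fact that only single over-long lines can exceed the limit); no intermediate chunks list, no second pass. Alternative, same cost.


-- ===== PORT A =====
-- A's grouping loop body (state = (chunks, current, current_len); add_len = len(line) + (1 if current else 0)).
def pvStepA (limit : Int) (st : List (List Char) × List (List Char) × Int) (line : List Char) :
    List (List Char) × List (List Char) × Int :=
  if st.2.2 + ((line.length : Int) + (if st.2.1 = [] then 0 else 1)) > limit ∧ st.2.1 ≠ [] then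
    (st.1 ++ [PySem.Chars.join ['\n'] st.2.1], [line], (line.length : Int))
  else
    (st.1, st.2.1 ++ [line], st.2.2 + ((line.length : Int) + (if st.2.1 = [] then 0 else 1)))

-- A's second-pass body: append c, or its limit-sized slices (range step = limit).
def pvHardA (limit : Int) (out : List (List Char)) (c : List Char) : List (List Char) :=
  if (c.length : Int) ≤ limit then out ++ [c]
  else (PySem.List.pyRange 0 (c.length : Int) limit).foldl
        (fun out i => out ++ [PySem.Chars.slice c (some i) (some (i + limit))]) out

-- append the pending group to chunks, then the second pass over chunks.
def pvFinishA (limit : Int) (st : List (List Char) × List (List Char) × Int) : List String :=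
  ((if st.2.1 ≠ [] then st.1 ++ [PySem.Chars.join ['\n'] st.2.1] else st.1).foldl
    (pvHardA limit) []).map String.ofList

def chunk_telegram_html (text : String) (limit : Int) : List String :=
  if PySem.Chars.rstrip text.toList = [] then []
  else if (((PySem.Chars.rstrip text.toList).length : Int)) ≤ limit then
    [String.ofList (PySem.Chars.rstrip text.toList)]
  else
    pvFinishA limit
      ((PySem.Chars.splitOn (PySem.Chars.rstrip text.toList) ['\n']).foldl (pvStepA limit) ([], [], 0))

-- ===== PORT B =====
-- B's inner slice loop: append line[i:i+limit] for i in range(0, len(line), limit).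
def pvSliceB (limit : Int) (out : List (List Char)) (line : List Char) : List (List Char) :=
  (PySem.List.pyRange 0 (line.length : Int) limit).foldl
    (fun out i => out ++ [PySem.Chars.slice line (some i) (some (i + limit))]) out

-- B's single loop body (state = (out, buf); buf = the pending chunk already joined, none = no pending chunk).
def pvStepB (limit : Int) (st : List (List Char) × Option (List Char)) (line : List Char) :
    List (List Char) × Option (List Char) :=
  if (line.length : Int) > limit then
    (pvSliceB limit (match st.2 with | some b => st.1 ++ [b] | none => st.1) line, none)
  else
    match st.2 with
    | none => (st.1, some line)
    | some b =>
        if (b.length : Int) + 1 + (line.length : Int) ≤ limit then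
          (st.1, some (b ++ '\n' :: line))
        else
          (st.1 ++ [b], some line)

-- flush the pending buffer, if any.
def pvFinishB (st : List (List Char) × Option (List Char)) : List String :=
  (match st.2 with | some b => st.1 ++ [b] | none => st.1).map String.ofList

def chunk_telegram_html_alt (text : String) (limit : Int) : List String :=
  if PySem.Chars.rstrip text.toList = [] then []
  else if (((PySem.Chars.rstrip text.toList).length : Int)) ≤ limit then
    [String.ofList (PySem.Chars.rstrip text.toList)]
  else
    pvFinishB
      ((PySem.Chars.splitOn (PySem.Chars.rstrip text.toList) ['\n']).foldl (pvStepB limit) ([], none))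

-- ===== PRECONDITION & SPEC =====
-- Pre_ excludes only limit = 0 with nonempty rstripped text, where Python A (and B) raises ValueError (range() arg 3 must not be zero).
def Pre_chunk_telegram_html (text : String) (limit : Int) : Prop :=
  limit = 0 → PySem.Chars.rstrip text.toList = []
instance (text : String) (limit : Int) : Decidable (Pre_chunk_telegram_html text limit) := by
  unfold Pre_chunk_telegram_html; infer_instance

def pvWitness_chunk_telegram_html : String × Int := ("ab\ncd", 3)

def Spec_chunk_telegram_html (text : String) (limit : Int) (out : List String) : Prop := out = chunk_telegram_html_alt text limit
instance (text : String) (limit : Int) (out : List String) : Decidable (Spec_chunk_telegram_html text limit out) := by unfold Spec_chunk_telegram_html; infer_instance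

-- ===== CLAIM (what is proved, stated in full; the proofs are below) =====
def Claim_equal_chunk_telegram_html : Prop := ∀ (text : String) (limit : Int), Dom_chunk_telegram_html text limit → Pre_chunk_telegram_html text limit → Spec_chunk_telegram_html text limit (chunk_telegram_html text limit)

-- ===== LEMMAS AND PROOFS =====

-- join over a snoc, nonempty prefix.
theorem pv_join_snoc (cur : List (List Char)) (l : List Char) (h : cur ≠ []) :
    PySem.Chars.join ['\n'] (cur ++ [l]) = PySem.Chars.join ['\n'] cur ++ '\n' :: l := by
  induction cur with
  | nil => exact absurd rfl h
  | cons c cs ih =>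
    cases cs with
    | nil => simp [PySem.Chars.join_singleton, PySem.Chars.join_cons_cons]
    | cons c2 cs2 =>
      have ih' := ih (by simp)
      simp only [List.cons_append] at ih' ⊢
      rw [PySem.Chars.join_cons_cons, ih', PySem.Chars.join_cons_cons]
      simp

theorem pv_foldl_snoc (limit : Int) (chunks : List (List Char)) (c : List Char) :
    (chunks ++ [c]).foldl (pvHardA limit) [] = pvHardA limit (chunks.foldl (pvHardA limit) []) c := by
  simp [List.foldl_append]

theorem pvHardA_le (limit : Int) (out : List (List Char)) (c : List Char)
    (h : (c.length : Int) ≤ limit) : pvHardA limit out c = out ++ [c] := by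
  simp [pvHardA, h]

theorem pvHardA_gt (limit : Int) (out : List (List Char)) (c : List Char)
    (h : limit < (c.length : Int)) : pvHardA limit out c = pvSliceB limit out c := by
  simp [pvHardA, pvSliceB, not_le.mpr h]

-- The coupling invariant between A's loop state and B's loop state: either both have no
-- pending group, or B's buf is A's joined current (within the limit), or B has already
-- emitted the slices of A's pending single over-long line.
def pvInv (limit : Int) (sA : List (List Char) × List (List Char) × Int)
    (sB : List (List Char) × Option (List Char)) : Prop :=
  (sA.2.1 = [] ∧ sA.2.2 = 0 ∧ sB.2 = none ∧ sB.1 = sA.1.foldl (pvHardA limit) [])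
  ∨ (sA.2.1 ≠ [] ∧ sA.2.2 = ((PySem.Chars.join ['\n'] sA.2.1).length : Int) ∧
     ((sB.2 = some (PySem.Chars.join ['\n'] sA.2.1) ∧ sA.2.2 ≤ limit ∧
        sB.1 = sA.1.foldl (pvHardA limit) [])
      ∨ (sB.2 = none ∧ (∃ l, sA.2.1 = [l] ∧ limit < (l.length : Int)) ∧
        sB.1 = (sA.1 ++ [PySem.Chars.join ['\n'] sA.2.1]).foldl (pvHardA limit) [])))

theorem pvStep_inv (limit : Int) (line : List Char)
    (chunks cur : List (List Char)) (clen : Int) (out : List (List Char)) (buf : Option (List Char))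
    (h : pvInv limit (chunks, cur, clen) (out, buf)) :
    pvInv limit (pvStepA limit (chunks, cur, clen) line) (pvStepB limit (out, buf) line) := by
  simp only [pvInv] at h
  rcases h with ⟨hcur, hclen, hbuf, hout⟩ | ⟨hcur, hclen, hrest⟩
  · -- no pending group (initial state)
    subst hcur hclen hbuf hout
    have hA : pvStepA limit (chunks, [], 0) line = (chunks, [line], (line.length : Int)) := by
      simp [pvStepA]
    rw [hA]
    by_cases hl : (line.length : Int) > limit
    · have hB : pvStepB limit (chunks.foldl (pvHardA limit) [], none) line =
          (pvSliceB limit (chunks.foldl (pvHardA limit) []) line, none) := by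
        simp [pvStepB, hl]
      rw [hB]
      simp only [pvInv]
      refine Or.inr ⟨by simp, by simp [PySem.Chars.join_singleton],
        Or.inr ⟨by trivial, ⟨line, by trivial, hl⟩, ?_⟩⟩
      rw [PySem.Chars.join_singleton, pv_foldl_snoc, pvHardA_gt _ _ _ hl]
    · have hB : pvStepB limit (chunks.foldl (pvHardA limit) [], none) line =
          (chunks.foldl (pvHardA limit) [], some line) := by
        simp [pvStepB, hl]
      rw [hB]
      simp only [pvInv]
      exact Or.inr ⟨by simp, by simp [PySem.Chars.join_singleton],
        Or.inl ⟨by rw [PySem.Chars.join_singleton], by simpa using not_lt.mp hl, by trivial⟩⟩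
  · rcases hrest with ⟨hbuf, hle, hout⟩ | ⟨hbuf, ⟨l, hl, hlgt⟩, hout⟩
    · -- sync: buf = some (join cur), length ≤ limit
      subst hbuf hout
      have hclen0 : (0 : Int) ≤ clen := by rw [hclen]; positivity
      by_cases hl : (line.length : Int) > limit
      · -- over-long line: A flushes then holds [line]; B flushes buf and emits slices
        have hA : pvStepA limit (chunks, cur, clen) line =
            (chunks ++ [PySem.Chars.join ['\n'] cur], [line], (line.length : Int)) := by
          simp only [pvStepA]
          rw [if_pos ⟨by rw [if_neg hcur]; omega, hcur⟩]
        have hB : pvStepB limit (chunks.foldl (pvHardA limit) [],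
              some (PySem.Chars.join ['\n'] cur)) line =
            (pvSliceB limit (chunks.foldl (pvHardA limit) [] ++ [PySem.Chars.join ['\n'] cur]) line,
              none) := by
          simp [pvStepB, hl]
        rw [hA, hB]
        simp only [pvInv]
        refine Or.inr ⟨by simp, by simp [PySem.Chars.join_singleton],
          Or.inr ⟨by trivial, ⟨line, by trivial, hl⟩, ?_⟩⟩
        rw [PySem.Chars.join_singleton, pv_foldl_snoc, pv_foldl_snoc, pvHardA_gt _ _ _ hl,
          pvHardA_le _ _ _ (hclen ▸ hle)]
      · have hl' : (line.length : Int) ≤ limit := not_lt.mp hl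
        by_cases hfit : clen + ((line.length : Int) + 1) ≤ limit
        · -- line joins the current group
          have hA : pvStepA limit (chunks, cur, clen) line =
              (chunks, cur ++ [line], clen + ((line.length : Int) + (if cur = [] then 0 else 1))) := by
            simp only [pvStepA]
            rw [if_neg]
            rintro ⟨hgt, -⟩
            rw [if_neg hcur] at hgt; omega
          have hB : pvStepB limit (chunks.foldl (pvHardA limit) [],
                some (PySem.Chars.join ['\n'] cur)) line =
              (chunks.foldl (pvHardA limit) [],
                some (PySem.Chars.join ['\n'] cur ++ '\n' :: line)) := by
            have hcond : ((PySem.Chars.join ['\n'] cur).length : Int) + 1 + (line.length : Int) ≤ limit := by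
              omega
            simp [pvStepB, hl, hcond]
          rw [hA, hB]
          simp only [pvInv]
          refine Or.inr ⟨by simp, ?_, Or.inl ⟨?_, ?_, by trivial⟩⟩
          · rw [pv_join_snoc _ _ hcur, if_neg hcur]
            simp; omega
          · rw [pv_join_snoc _ _ hcur]
          · rw [if_neg hcur]; omega
        · -- flush: A appends join cur to chunks; B appends buf to out
          have hA : pvStepA limit (chunks, cur, clen) line =
              (chunks ++ [PySem.Chars.join ['\n'] cur], [line], (line.length : Int)) := by
            simp only [pvStepA]
            rw [if_pos ⟨by rw [if_neg hcur]; omega, hcur⟩]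
          have hB : pvStepB limit (chunks.foldl (pvHardA limit) [],
                some (PySem.Chars.join ['\n'] cur)) line =
              (chunks.foldl (pvHardA limit) [] ++ [PySem.Chars.join ['\n'] cur], some line) := by
            have hcond : ¬ (((PySem.Chars.join ['\n'] cur).length : Int) + 1 + (line.length : Int) ≤ limit) := by
              omega
            simp [pvStepB, hl, hcond]
          rw [hA, hB]
          simp only [pvInv]
          refine Or.inr ⟨by simp, by simp [PySem.Chars.join_singleton],
            Or.inl ⟨by rw [PySem.Chars.join_singleton], by simpa using hl', ?_⟩⟩
          rw [pv_foldl_snoc, pvHardA_le _ _ _ (hclen ▸ hle)]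
    · -- ahead: A holds a single over-long line whose slices B already emitted
      subst hbuf hout hl
      rw [PySem.Chars.join_singleton] at hclen
      have hA : pvStepA limit (chunks, [l], clen) line =
          (chunks ++ [PySem.Chars.join ['\n'] [l]], [line], (line.length : Int)) := by
        simp only [pvStepA]
        rw [if_pos ⟨by rw [if_neg (List.cons_ne_nil l [])]; omega, List.cons_ne_nil l []⟩]
      rw [hA, PySem.Chars.join_singleton]
      by_cases hl2 : (line.length : Int) > limit
      · have hB : pvStepB limit ((chunks ++ [PySem.Chars.join ['\n'] [l]]).foldl (pvHardA limit) [], none) line =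
            (pvSliceB limit ((chunks ++ [PySem.Chars.join ['\n'] [l]]).foldl (pvHardA limit) []) line, none) := by
          simp [pvStepB, hl2]
        rw [PySem.Chars.join_singleton] at hB
        rw [hB]
        simp only [pvInv]
        refine Or.inr ⟨by simp, by simp [PySem.Chars.join_singleton],
          Or.inr ⟨by trivial, ⟨line, by trivial, hl2⟩, ?_⟩⟩
        rw [PySem.Chars.join_singleton, pv_foldl_snoc (chunks := chunks ++ [l]),
          pvHardA_gt _ _ _ hl2]
      · have hB : pvStepB limit ((chunks ++ [l]).foldl (pvHardA limit) [], none) line =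
            ((chunks ++ [l]).foldl (pvHardA limit) [], some line) := by
          simp [pvStepB, hl2]
        rw [hB]
        simp only [pvInv]
        exact Or.inr ⟨by simp, by simp [PySem.Chars.join_singleton],
          Or.inl ⟨by rw [PySem.Chars.join_singleton], by simpa using not_lt.mp hl2, by trivial⟩⟩

theorem pv_fold_inv (limit : Int) (ls : List (List Char)) :
    ∀ (sA : List (List Char) × List (List Char) × Int) (sB : List (List Char) × Option (List Char)),
      pvInv limit sA sB → pvInv limit (ls.foldl (pvStepA limit) sA) (ls.foldl (pvStepB limit) sB) := by
  induction ls with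
  | nil => intro sA sB h; exact h
  | cons l ls ih =>
    intro sA sB h
    simp only [List.foldl_cons]
    exact ih _ _ (pvStep_inv limit l sA.1 sA.2.1 sA.2.2 sB.1 sB.2 h)

theorem pvFinish_inv (limit : Int) (sA : List (List Char) × List (List Char) × Int)
    (sB : List (List Char) × Option (List Char)) (h : pvInv limit sA sB) :
    pvFinishB sB = pvFinishA limit sA := by
  obtain ⟨chunks, cur, clen⟩ := sA
  obtain ⟨out, buf⟩ := sB
  simp only [pvInv] at h
  rcases h with ⟨hcur, -, hbuf, hout⟩ | ⟨hcur, hclen, hrest⟩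
  · subst hcur hbuf hout
    simp [pvFinishA, pvFinishB]
  · rcases hrest with ⟨hbuf, hle, hout⟩ | ⟨hbuf, ⟨l, hl, hlgt⟩, hout⟩
    · subst hbuf hout
      simp only [pvFinishA, pvFinishB, if_pos hcur]
      rw [pv_foldl_snoc, pvHardA_le _ _ _ (hclen ▸ hle)]
    · subst hbuf hout hl
      simp [pvFinishA, pvFinishB]

-- ===== VERDICT (by name: the statement is the Claim_ definition above) =====
theorem chunk_telegram_html_spec : Claim_equal_chunk_telegram_html := by
  unfold Claim_equal_chunk_telegram_html
  intro text limit _ _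
  unfold Spec_chunk_telegram_html chunk_telegram_html chunk_telegram_html_alt
  by_cases h1 : PySem.Chars.rstrip text.toList = []
  · rw [if_pos h1, if_pos h1]
  · rw [if_neg h1, if_neg h1]
    by_cases h2 : (((PySem.Chars.rstrip text.toList).length : Int)) ≤ limit
    · rw [if_pos h2, if_pos h2]
    · rw [if_neg h2, if_neg h2]
      exact (pvFinish_inv limit _ _
        (pv_fold_inv limit _ ([], [], 0) ([], none) (by simp [pvInv]))).symm
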